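-- pv_equiv track=rewrite | github.com/BlackRubick/Dataset-Project | Frecuency.py | absolute_frecuency
-- ===== SOURCE A (Python) =====
-- def absolute_frecuency(data, limit_lower, limit_superior):
--     array_count = []
--     array_first = []
--     contain = list(zip(limit_lower, limit_superior))
--     for v in data:
--         if limit_lower[0] <= v <= limit_superior[0]:
--             array_first.append(v)
--     array_count.append(len(array_first))
--     for j, (x, y) in enumerate(contain):
--         if j > 0:
--             count = sum(x < v <= y for v in data)
--             array_count.append(count)
--     return array_count
-- ===== SOURCE B (Python) =====
-- def _bisect_left(a, x):
--     lo, hi = 0, len(a)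
--     while lo < hi:
--         mid = (lo + hi) // 2
--         if a[mid] < x:
--             lo = mid + 1
--         else:
--             hi = mid
--     return lo
--
--
-- def _bisect_right(a, x):
--     lo, hi = 0, len(a)
--     while lo < hi:
--         mid = (lo + hi) // 2
--         if x < a[mid]:
--             hi = mid
--         else:
--             lo = mid + 1
--     return lo
--
--
-- def absolute_frecuency(data, limit_lower, limit_superior):
--     s = sorted(data)
--     if limit_lower and limit_superior:
--         first = max(0, _bisect_right(s, limit_superior[0]) - _bisect_left(s, limit_lower[0]))
--     else:
--         first = 0
--     counts = [first]
--     for x, y in list(zip(limit_lower, limit_superior))[1:]: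
--         counts.append(max(0, _bisect_right(s, y) - _bisect_right(s, x)))
--     return counts
-- ===== Notes on version B (the rewrite author's own statement) =====
-- stated objective: faster
-- what changed: Instead of scanning the whole data list once per bin, B sorts the data once and computes each bin count as a clamped difference of two binary searches (hand-written bisect_left/bisect_right) over the sorted copy.
import Mathlib
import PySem

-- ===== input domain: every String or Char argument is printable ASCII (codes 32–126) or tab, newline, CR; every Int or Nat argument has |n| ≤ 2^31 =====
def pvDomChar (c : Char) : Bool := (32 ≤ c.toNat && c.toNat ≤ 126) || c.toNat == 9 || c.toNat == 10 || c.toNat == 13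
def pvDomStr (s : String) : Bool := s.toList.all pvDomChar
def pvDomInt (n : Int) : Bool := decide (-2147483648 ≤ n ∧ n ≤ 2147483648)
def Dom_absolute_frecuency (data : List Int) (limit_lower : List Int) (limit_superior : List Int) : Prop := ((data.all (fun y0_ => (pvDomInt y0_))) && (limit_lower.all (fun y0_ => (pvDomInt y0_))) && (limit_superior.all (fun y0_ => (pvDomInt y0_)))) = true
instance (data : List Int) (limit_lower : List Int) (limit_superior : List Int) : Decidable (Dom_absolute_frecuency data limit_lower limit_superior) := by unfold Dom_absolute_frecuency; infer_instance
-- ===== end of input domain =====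

-- B replaces A's per-bin scans over the data with one sort of the data plus two binary
-- searches per bin (objective: faster, asymptotically O((n+bins)·log n) vs O(bins·n)).


-- ===== PORT A =====
-- literal transliteration of A: the first-bin filter loop, then a loop over
-- enumerate(zip(...)) that counts each later bin by scanning all of data.
-- limit_lower[0] / limit_superior[0] are written headD 0: inside Pre_ either data = []
-- (the loop body never runs), or the list is nonempty (headD 0 = the real head), or
-- limit_superior = [] while the chained comparison short-circuits (first conjunct false).
def absolute_frecuency (data : List Int) (limit_lower : List Int) (limit_superior : List Int) : List Int :=
  let contain := limit_lower.zip limit_superior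
  let array_first := data.foldl
    (fun acc v => if limit_lower.headD 0 ≤ v ∧ v ≤ limit_superior.headD 0 then acc ++ [v] else acc)
    ([] : List Int)
  let array_count : List Int := [] ++ [(array_first.length : Int)]
  (PySem.List.enumerate contain 0).foldl
    (fun ac jxy =>
      if jxy.1 > 0 then
        ac ++ [data.foldl (fun c v => if jxy.2.1 < v ∧ v ≤ jxy.2.2 then c + 1 else c) (0 : Int)]
      else ac)
    array_count

-- ===== PORT B =====
-- transliteration of Source B: sort data once; each bin count is a difference of two binary
-- searches (Source B's hand-written _bisect_left/_bisect_right are exactly the loops of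
-- PySem.List.bisectLeft / bisectRight); zip(...)[1:] is drop 1 (slice from index 1).
def absolute_frecuency_alt (data : List Int) (limit_lower : List Int) (limit_superior : List Int) : List Int :=
  let s := PySem.List.sorted data (fun v => v)
  let first : Int :=
    if limit_lower ≠ [] ∧ limit_superior ≠ [] then
      max 0 ((PySem.List.bisectRight s (limit_superior.headD 0) : Int)
             - (PySem.List.bisectLeft s (limit_lower.headD 0) : Int))
    else 0
  ((limit_lower.zip limit_superior).drop 1).foldl
    (fun counts xy =>
      counts ++ [max 0 ((PySem.List.bisectRight s xy.2 : Int)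
                        - (PySem.List.bisectRight s xy.1 : Int))])
    [first]

-- ===== PRECONDITION & SPEC =====
-- Pre_ excludes exactly the inputs where A raises IndexError: data nonempty with
-- limit_lower empty, or with limit_superior empty while some v reaches the second
-- conjunct of the chained comparison (limit_lower[0] <= v).
def Pre_absolute_frecuency (data : List Int) (limit_lower : List Int) (limit_superior : List Int) : Prop :=
  data = [] ∨ (limit_lower ≠ [] ∧ (limit_superior ≠ [] ∨ ∀ v ∈ data, v < limit_lower.headD 0))
instance (data : List Int) (limit_lower : List Int) (limit_superior : List Int) : Decidable (Pre_absolute_frecuency data limit_lower limit_superior) := by unfold Pre_absolute_frecuency; infer_instance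
def pvWitness_absolute_frecuency : List Int × List Int × List Int := ([1, 2, 3, 10], [0, 3], [3, 8])

def Spec_absolute_frecuency (data : List Int) (limit_lower : List Int) (limit_superior : List Int) (out : List Int) : Prop := out = absolute_frecuency_alt data limit_lower limit_superior
instance (data : List Int) (limit_lower : List Int) (limit_superior : List Int) (out : List Int) : Decidable (Spec_absolute_frecuency data limit_lower limit_superior out) := by unfold Spec_absolute_frecuency; infer_instance

-- ===== CLAIM (what is proved, stated in full; the proofs are below) =====
def Claim_equal_absolute_frecuency : Prop := ∀ (data : List Int) (limit_lower : List Int) (limit_superior : List Int), Dom_absolute_frecuency data limit_lower limit_superior → Pre_absolute_frecuency data limit_lower limit_superior → Spec_absolute_frecuency data limit_lower limit_superior (absolute_frecuency data limit_lower limit_superior)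
-- ===== LEMMAS AND PROOFS =====

-- a predicate that is true strictly below n and false from n on counts to exactly n
theorem countP_of_boundary (p : Int → Bool) :
    ∀ (s : List Int) (n : Nat), n ≤ s.length →
    (∀ j (hj : j < s.length), j < n → p s[j] = true) →
    (∀ j (hj : j < s.length), n ≤ j → p s[j] = false) →
    s.countP p = n := by
  intro s
  induction s with
  | nil => intro n hn _ _; simp only [List.countP_nil]; simp at hn; omega
  | cons a t ih =>
    intro n hn hlt hge
    cases n with
    | zero =>
      rw [List.countP_eq_zero]
      intro x hx
      rcases List.mem_iff_getElem.1 hx with ⟨i, hi, rfl⟩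
      simp [hge i hi (Nat.zero_le i)]
    | succ m =>
      have ha : p a = true := by
        have := hlt 0 (by simp) (Nat.succ_pos m); simpa using this
      have ht : t.countP p = m := by
        apply ih m (by simpa using hn)
        · intro j hj hjm
          have := hlt (j+1) (by simpa using Nat.succ_lt_succ hj) (Nat.succ_lt_succ hjm)
          simpa using this
        · intro j hj hjm
          have := hge (j+1) (by simpa using Nat.succ_lt_succ hj) (Nat.succ_le_succ hjm)
          simpa using this
      simp [ha, ht]

theorem bisectRight_eq_countP (s : List Int) (t : Int)
    (hs : s.Pairwise (· ≤ ·)) :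
    PySem.List.bisectRight s t = s.countP (fun v => decide (v ≤ t)) := by
  obtain ⟨hle, hlt, hgt⟩ := PySem.List.bisectRight_spec s t hs
  exact (countP_of_boundary (fun v => decide (v ≤ t)) s (PySem.List.bisectRight s t) hle
    (fun j hj hjn => decide_eq_true (hlt j hj hjn))
    (fun j hj hjn => decide_eq_false (not_le.2 (hgt j hj hjn)))).symm

theorem bisectLeft_eq_countP (s : List Int) (t : Int)
    (hs : s.Pairwise (· ≤ ·)) :
    PySem.List.bisectLeft s t = s.countP (fun v => decide (v < t)) := by
  obtain ⟨hle, hlt, hgt⟩ := PySem.List.bisectLeft_spec s t hs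
  exact (countP_of_boundary (fun v => decide (v < t)) s (PySem.List.bisectLeft s t) hle
    (fun j hj hjn => decide_eq_true (hlt j hj hjn))
    (fun j hj hjn => decide_eq_false (not_lt.2 (hgt j hj hjn)))).symm

-- splitting count(x < v ≤ y) + count(v ≤ x) = count(v ≤ y) when x ≤ y
theorem countP_split_lt (x y : Int) (h : x ≤ y) (l : List Int) :
    l.countP (fun v => decide (x < v ∧ v ≤ y)) + l.countP (fun v => decide (v ≤ x))
      = l.countP (fun v => decide (v ≤ y)) := by
  induction l with
  | nil => simp
  | cons a t ih =>
    simp only [List.countP_cons, decide_eq_true_eq]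
    split_ifs <;> omega

-- splitting count(x ≤ v ≤ y) + count(v < x) = count(v ≤ y) when x ≤ y
theorem countP_split_le (x y : Int) (h : x ≤ y) (l : List Int) :
    l.countP (fun v => decide (x ≤ v ∧ v ≤ y)) + l.countP (fun v => decide (v < x))
      = l.countP (fun v => decide (v ≤ y)) := by
  induction l with
  | nil => simp
  | cons a t ih =>
    simp only [List.countP_cons, decide_eq_true_eq]
    split_ifs <;> omega

-- per-bin agreement for the tail bins: counting x < v ≤ y over data equals the
-- clamped difference of the two bisect_rights on the sorted copy
theorem bin_count_eq (data : List Int) (x y : Int) :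
    (data.countP (fun v => decide (x < v ∧ v ≤ y)) : Int)
      = max 0 ((PySem.List.bisectRight (PySem.List.sorted data (fun v => v)) y : Int)
               - (PySem.List.bisectRight (PySem.List.sorted data (fun v => v)) x : Int)) := by
  set s := PySem.List.sorted data (fun v => v) with hsdef
  have hp : s.Pairwise (· ≤ ·) := PySem.List.sorted_pairwise data (fun v => v)
  have hperm : s.Perm data := PySem.List.sorted_perm data (fun v => v) false
  rw [bisectRight_eq_countP s y hp, bisectRight_eq_countP s x hp,
    hperm.countP_eq, hperm.countP_eq]
  rcases le_or_gt x y with hxy | hxy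
  · have := countP_split_lt x y hxy data
    have hmax : (0 : Int) ≤ (data.countP (fun v => decide (v ≤ y)) : Int)
        - (data.countP (fun v => decide (v ≤ x)) : Int) := by omega
    rw [max_eq_right hmax]; omega
  · have h0 : data.countP (fun v => decide (x < v ∧ v ≤ y)) = 0 := by
      rw [List.countP_eq_zero]; intro a _; simp [decide_eq_true_eq]; omega
    have hmono : data.countP (fun v => decide (v ≤ y)) ≤ data.countP (fun v => decide (v ≤ x)) := by
      apply List.countP_mono_left; intro a _ ha
      simp only [decide_eq_true_eq] at *; omega
    rw [h0, max_eq_left (by omega)]; simp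

-- first-bin agreement when both limit lists are nonempty
theorem first_count_eq (data : List Int) (x y : Int) :
    (data.countP (fun v => decide (x ≤ v ∧ v ≤ y)) : Int)
      = max 0 ((PySem.List.bisectRight (PySem.List.sorted data (fun v => v)) y : Int)
               - (PySem.List.bisectLeft (PySem.List.sorted data (fun v => v)) x : Int)) := by
  set s := PySem.List.sorted data (fun v => v) with hsdef
  have hp : s.Pairwise (· ≤ ·) := PySem.List.sorted_pairwise data (fun v => v)
  have hperm : s.Perm data := PySem.List.sorted_perm data (fun v => v) false
  rw [bisectRight_eq_countP s y hp, bisectLeft_eq_countP s x hp,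
    hperm.countP_eq, hperm.countP_eq]
  rcases le_or_gt x y with hxy | hxy
  · have := countP_split_le x y hxy data
    have hmax : (0 : Int) ≤ (data.countP (fun v => decide (v ≤ y)) : Int)
        - (data.countP (fun v => decide (v < x)) : Int) := by omega
    rw [max_eq_right hmax]; omega
  · have h0 : data.countP (fun v => decide (x ≤ v ∧ v ≤ y)) = 0 := by
      rw [List.countP_eq_zero]; intro a _; simp [decide_eq_true_eq]; omega
    have hmono : data.countP (fun v => decide (v ≤ y)) ≤ data.countP (fun v => decide (v < x)) := by
      apply List.countP_mono_left; intro a _ ha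
      simp only [decide_eq_true_eq] at *; omega
    rw [h0, max_eq_left (by omega)]; simp

-- A's second loop: folding over enumerate with the j > 0 guard appends one scan-count
-- per bin after the first (all indices from start ≥ 1 pass the guard)
theorem enum_fold_eq (data : List Int) :
    ∀ (rest : List (Int × Int)) (k : Int), 1 ≤ k → ∀ (init : List Int),
    (PySem.List.enumerate rest k).foldl
      (fun ac jxy =>
        if jxy.1 > 0 then
          ac ++ [data.foldl (fun c v => if jxy.2.1 < v ∧ v ≤ jxy.2.2 then c + 1 else c) (0 : Int)]
        else ac) init
      = init ++ rest.map (fun xy => (data.countP (fun v => decide (xy.1 < v ∧ v ≤ xy.2)) : Int)) := by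
  intro rest
  induction rest with
  | nil => intro k _ init; simp [PySem.List.enumerate]
  | cons b r ih =>
    intro k hk init
    rw [PySem.List.enumerate_cons]
    simp only [List.foldl_cons]
    rw [if_pos (by omega : k > 0), ih (k + 1) (by omega)]
    have hcnt : data.foldl (fun c v => if b.1 < v ∧ v ≤ b.2 then c + 1 else c) (0 : Int)
        = (data.countP (fun v => decide (b.1 < v ∧ v ≤ b.2)) : Int) := by
      have := PySem.List.foldl_count_if (fun v => decide (b.1 < v ∧ v ≤ b.2)) data (0 : Int)
      simpa using this
    rw [hcnt]
    simp only [List.map_cons, List.append_assoc, List.singleton_append]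

theorem second_loop (data : List Int) (con : List (Int × Int)) (init : List Int) :
    (PySem.List.enumerate con 0).foldl
      (fun ac jxy =>
        if jxy.1 > 0 then
          ac ++ [data.foldl (fun c v => if jxy.2.1 < v ∧ v ≤ jxy.2.2 then c + 1 else c) (0 : Int)]
        else ac) init
      = init ++ (con.drop 1).map (fun xy => (data.countP (fun v => decide (xy.1 < v ∧ v ≤ xy.2)) : Int)) := by
  cases con with
  | nil => simp [PySem.List.enumerate]
  | cons b r =>
    rw [PySem.List.enumerate_cons, List.foldl_cons, if_neg (by omega : ¬ ((0 : Int) > 0)),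
      enum_fold_eq data r (0 + 1) (by omega) init]
    simp

-- A in closed form: head count followed by one scan-count per later bin
theorem A_shape (data limit_lower limit_superior : List Int) :
    absolute_frecuency data limit_lower limit_superior
      = (data.countP (fun v => decide (limit_lower.headD 0 ≤ v ∧ v ≤ limit_superior.headD 0)) : Int)
        :: ((limit_lower.zip limit_superior).drop 1).map
             (fun xy => (data.countP (fun v => decide (xy.1 < v ∧ v ≤ xy.2)) : Int)) := by
  have hfirst : (data.foldl
      (fun acc v => if limit_lower.headD 0 ≤ v ∧ v ≤ limit_superior.headD 0 then acc ++ [v] else acc)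
      ([] : List Int))
      = data.filter (fun v => decide (limit_lower.headD 0 ≤ v ∧ v ≤ limit_superior.headD 0)) := by
    have := PySem.List.foldl_append_if_eq_filter
      (fun v => decide (limit_lower.headD 0 ≤ v ∧ v ≤ limit_superior.headD 0)) data ([] : List Int)
    simpa using this
  simp only [absolute_frecuency]
  rw [second_loop data (limit_lower.zip limit_superior), hfirst, List.countP_eq_length_filter]
  simp

-- B in closed form
theorem B_shape (data limit_lower limit_superior : List Int) :
    absolute_frecuency_alt data limit_lower limit_superior
      = (if limit_lower ≠ [] ∧ limit_superior ≠ [] then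
           max 0 ((PySem.List.bisectRight (PySem.List.sorted data (fun v => v)) (limit_superior.headD 0) : Int)
                  - (PySem.List.bisectLeft (PySem.List.sorted data (fun v => v)) (limit_lower.headD 0) : Int))
         else 0)
        :: ((limit_lower.zip limit_superior).drop 1).map
             (fun xy => max 0 ((PySem.List.bisectRight (PySem.List.sorted data (fun v => v)) xy.2 : Int)
                               - (PySem.List.bisectRight (PySem.List.sorted data (fun v => v)) xy.1 : Int))) := by
  unfold absolute_frecuency_alt
  rw [PySem.List.foldl_append_singleton_eq_map]
  simp

-- ===== VERDICT (by name: the statement is the Claim_ definition above) =====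
theorem absolute_frecuency_spec : Claim_equal_absolute_frecuency := by
  intro data limit_lower limit_superior _ hpre
  unfold Spec_absolute_frecuency
  rw [A_shape, B_shape]
  congr 1
  · -- head elements
    by_cases hne : limit_lower ≠ [] ∧ limit_superior ≠ []
    · rw [if_pos hne]; exact first_count_eq data _ _
    · rw [if_neg hne]
      have h0 : data.countP
          (fun v => decide (limit_lower.headD 0 ≤ v ∧ v ≤ limit_superior.headD 0)) = 0 := by
        rw [List.countP_eq_zero]
        intro a ha
        rcases hpre with hd | ⟨hll, hrest⟩
        · subst hd; simp at ha
        · rcases hrest with hls | hall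
          · exact absurd ⟨hll, hls⟩ hne
          · simp only [decide_eq_true_eq]
            have := hall a ha; omega
      rw [h0]; simp
  · -- tail bins
    apply List.map_congr_left
    intro xy _
    exact bin_count_eq data xy.1 xy.2
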